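-- pv_equiv track=rewrite | github.com/JustPersona/generative-agents | environment/frontend_server/api/views.py | drop_duplication
-- ===== SOURCE A (Python) =====
-- def drop_duplication(data):
--     last_data = dict()
--     for step, items in data.items():
--         tmp = items.copy()
--         for p_name, item in tmp.items():
--             if p_name in last_data and last_data[p_name] == item:
--                 del data[step][p_name]
--             else:
--                 last_data[p_name] = item
--     return data
-- ===== SOURCE B (Python) =====
-- def drop_duplication(data):
--     # Group each person's (step, item) occurrences in step order.
--     occ = {}
--     for step, items in data.items():
--         for p_name, item in items.items():
--             occ.setdefault(p_name, []).append((step, item))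
--     # Per person, consecutive-dedup the occurrence list; record kept (step, person) pairs.
--     keep = set()
--     for p_name, svs in occ.items():
--         prev = object()  # sentinel, never equal to any item
--         for step, item in svs:
--             if item != prev:
--                 keep.add((step, p_name))
--                 prev = item
--     # Rebuild each step's dict in place, keeping only the recorded entries.
--     for step in list(data):
--         data[step] = {p: v for p, v in data[step].items() if (step, p) in keep}
--     return data
-- ===== Notes on version B (the rewrite author's own statement) =====
-- stated objective: alternative
-- what changed: Instead of streaming over steps with a running last-value dict and deleting entries in place, B builds a per-person index of (step, item) occurrences, consecutive-dedups each person's list into a keep-set of (step, person) pairs, and rebuilds each step's dict by filtering against that set.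
import Mathlib
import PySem

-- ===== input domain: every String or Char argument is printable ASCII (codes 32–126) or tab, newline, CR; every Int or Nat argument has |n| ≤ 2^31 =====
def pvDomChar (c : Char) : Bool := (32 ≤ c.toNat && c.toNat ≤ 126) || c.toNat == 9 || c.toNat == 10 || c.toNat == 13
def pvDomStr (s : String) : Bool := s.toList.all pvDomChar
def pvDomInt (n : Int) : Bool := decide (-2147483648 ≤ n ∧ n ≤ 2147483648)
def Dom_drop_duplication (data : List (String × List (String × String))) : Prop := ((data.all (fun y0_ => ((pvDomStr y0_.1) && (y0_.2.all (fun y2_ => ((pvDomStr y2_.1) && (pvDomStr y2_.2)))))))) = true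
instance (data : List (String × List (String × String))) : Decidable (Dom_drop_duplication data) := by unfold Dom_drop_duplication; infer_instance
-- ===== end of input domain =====

-- B replaces A's streaming last-value dict with a per-person occurrence index, a keep-set of
-- (step, person) pairs, and a rebuild pass (objective: alternative decomposition, same cost).
-- A mutates its argument in place; the equivalence proved here is about the RETURN value only.

-- ===== PORT A =====
-- `del data[step][p_name]`: remove the (unique, under Pre_) entry with that key
def pyDelKey (xs : List (String × String)) (k : String) : List (String × String) :=
  match xs with
  | [] => []
  | a :: rest => if a.1 == k then rest else a :: pyDelKey rest k

-- body of A's inner loop: state = (last_data, current contents of data[step])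
def aInner (st2 : PySem.Dict String String × List (String × String)) (pv : String × String) :
    PySem.Dict String String × List (String × String) :=
  if PySem.Dict.contains st2.1 pv.1 && (PySem.Dict.getD st2.1 pv.1 "" == pv.2)
  then (st2.1, pyDelKey st2.2 pv.1)
  else (PySem.Dict.insert st2.1 pv.1 pv.2, st2.2)

-- body of A's outer loop: state = (last_data, steps of data already traversed)
def aOuter (st : PySem.Dict String String × List (String × List (String × String)))
    (sp : String × List (String × String)) :
    PySem.Dict String String × List (String × List (String × String)) :=
  let inner := sp.2.foldl aInner (st.1, sp.2)
  (inner.1, st.2 ++ [(sp.1, inner.2)])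

def drop_duplication (data : List (String × List (String × String))) :
    List (String × List (String × String)) :=
  (data.foldl aOuter (PySem.Dict.empty, [])).2

-- ===== PORT B =====
-- first pass: occ.setdefault(p_name, []).append((step, item))
def bOcc (occ : PySem.Dict String (List (String × String))) (sp : String × List (String × String)) :
    PySem.Dict String (List (String × String)) :=
  sp.2.foldl (fun occ pv => PySem.Dict.modify occ pv.1 [] (fun l => l ++ [(sp.1, pv.2)])) occ

-- second pass, per person: consecutive dedup with a scalar prev (None models the sentinel)
def bKeep (kp : PySem.Set (String × String)) (e : String × List (String × String)) :
    PySem.Set (String × String) :=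
  (e.2.foldl
    (fun (st : Option String × PySem.Set (String × String)) sv =>
      if st.1 ≠ some sv.2 then (some sv.2, PySem.Set.add st.2 (sv.1, e.1)) else st)
    (none, kp)).2

def drop_duplication_alt (data : List (String × List (String × String))) :
    List (String × List (String × String)) :=
  let occ := data.foldl bOcc PySem.Dict.empty
  let keep := occ.items.foldl bKeep PySem.Set.empty
  data.map (fun sp => (sp.1, sp.2.filter (fun pv => PySem.Set.contains keep (sp.1, pv.1))))

-- ===== PRECONDITION & SPEC =====
-- Pre_ excludes association lists with a duplicated step key or a duplicated person key within
-- a step: no Python dict has duplicate keys, so such lists correspond to no input of A.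
def Pre_drop_duplication (data : List (String × List (String × String))) : Prop :=
  (data.map Prod.fst).Nodup ∧ ∀ sp ∈ data, (sp.2.map Prod.fst).Nodup
instance (data : List (String × List (String × String))) : Decidable (Pre_drop_duplication data) := by
  unfold Pre_drop_duplication; infer_instance

def pvWitness_drop_duplication : (List (String × List (String × String))) :=
  [("1", [("a", "x")]), ("2", [("a", "x"), ("b", "y")])]

def Spec_drop_duplication (data : List (String × List (String × String))) (out : List (String × List (String × String))) : Prop := out = drop_duplication_alt data
instance (data : List (String × List (String × String))) (out : List (String × List (String × String))) : Decidable (Spec_drop_duplication data out) := by unfold Spec_drop_duplication; infer_instance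

-- ===== CLAIM (what is proved, stated in full; the proofs are below) =====
def Claim_equal_drop_duplication : Prop := ∀ (data : List (String × List (String × String))), Dom_drop_duplication data → Pre_drop_duplication data → Spec_drop_duplication data (drop_duplication data)

-- ===== LEMMAS AND PROOFS =====

-- kept step names of one person's (step, item) occurrence list, consecutive-dedup from prev
def mask (prev : Option String) : List (String × String) → List String
  | [] => []
  | sv :: rest => if prev = some sv.2 then mask prev rest else sv.1 :: mask (some sv.2) rest

-- one person's (step, item) occurrences across the data, in step order
def occs (p : String) (data : List (String × List (String × String))) : List (String × String) :=
  data.flatMap (fun sp => (sp.2.filter (fun pv => pv.1 == p)).map (fun pv => (sp.1, pv.2)))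

-- the common reference result both ports are proved equal to
def specOut (data : List (String × List (String × String))) : List (String × List (String × String)) :=
  data.map (fun sp => (sp.1, sp.2.filter (fun pv => decide (sp.1 ∈ mask none (occs pv.1 data)))))

-- value of prev after a person's occurrence list has been traversed
def lastV (prev : Option String) : List (String × String) → Option String
  | [] => prev
  | sv :: rest => lastV (some sv.2) rest

theorem mask_cons (prev : Option String) (sv : String × String) (rest : List (String × String)) :
    mask prev (sv :: rest) = if prev = some sv.2 then mask prev rest else sv.1 :: mask (some sv.2) rest := rfl

theorem occs_cons (p : String) (sp : String × List (String × String))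
    (rest : List (String × List (String × String))) :
    occs p (sp :: rest)
      = (sp.2.filter (fun pv => pv.1 == p)).map (fun pv => (sp.1, pv.2)) ++ occs p rest := by
  simp [occs]

theorem mask_append (prev : Option String) (xs ys : List (String × String)) :
    mask prev (xs ++ ys) = mask prev xs ++ mask (lastV prev xs) ys := by
  induction xs generalizing prev with
  | nil => simp [mask, lastV]
  | cons sv xs ih =>
    simp only [List.cons_append, mask, lastV]
    split_ifs with h
    · subst h
      rw [ih]
    · simp only [List.cons_append]
      rw [ih]

theorem mem_mask_sub {s : String} {prev : Option String} {xs : List (String × String)}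
    (h : s ∈ mask prev xs) : s ∈ xs.map Prod.fst := by
  induction xs generalizing prev with
  | nil => simp [mask] at h
  | cons sv xs ih =>
    simp only [mask] at h
    split_ifs at h with hc
    · exact List.mem_cons_of_mem _ (ih h)
    · rcases List.mem_cons.mp h with h | h
      · simp [h]
      · exact List.mem_cons_of_mem _ (ih h)

theorem mem_occs_steps {x : String} {p : String} {data : List (String × List (String × String))}
    (h : x ∈ (occs p data).map Prod.fst) : x ∈ data.map Prod.fst := by
  simp only [occs, List.map_flatMap, List.mem_flatMap] at h
  obtain ⟨sp, hsp, hx⟩ := h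
  simp only [List.map_map, List.mem_map] at hx
  obtain ⟨pv, _, hpv⟩ := hx
  have hx1 : x = sp.1 := by simpa using hpv.symm
  rw [hx1]
  exact List.mem_map_of_mem hsp

theorem filter_key_singleton {items : List (String × String)} {pv : String × String}
    (hnd : (items.map Prod.fst).Nodup) (hm : pv ∈ items) :
    items.filter (fun x => x.1 == pv.1) = [pv] := by
  induction items with
  | nil => cases hm
  | cons a items ih =>
    simp only [List.map_cons, List.nodup_cons] at hnd
    rcases List.mem_cons.mp hm with h | h
    · subst h
      simp only [List.filter_cons, beq_self_eq_true, if_pos]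
      have : items.filter (fun x => x.1 == pv.1) = [] := by
        apply List.filter_eq_nil_iff.mpr
        intro x hx hbe
        have hx1 : x.1 ∈ items.map Prod.fst := List.mem_map_of_mem hx
        rw [eq_of_beq hbe] at hx1
        exact hnd.1 hx1
      simp [this]
    · have hmem : pv.1 ∈ items.map Prod.fst := List.mem_map_of_mem h
      have hne : (a.1 == pv.1) = false := by
        refine beq_eq_false_iff_ne.mpr (fun he => hnd.1 ?_)
        rw [he]; exact hmem
      simp [hne, ih hnd.2 h]

theorem aCond_eq (d : PySem.Dict String String) (k v : String) :
    (PySem.Dict.contains d k && (PySem.Dict.getD d k "" == v)) = decide (PySem.Dict.get? d k = some v) := by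
  rw [PySem.Dict.contains_eq_isSome_get?, PySem.Dict.getD_eq_get?_getD]
  cases h : PySem.Dict.get? d k with
  | none => simp
  | some w => by_cases hw : w = v <;> simp [hw]

theorem pyDelKey_append {pre todo : List (String × String)} {p : String} {v : String}
    (h : p ∉ pre.map Prod.fst) : pyDelKey (pre ++ (p, v) :: todo) p = pre ++ todo := by
  induction pre with
  | nil => simp [pyDelKey]
  | cons a pre ih =>
    simp only [List.map_cons, List.mem_cons, not_or] at h
    have : (a.1 == p) = false := beq_eq_false_iff_ne.mpr (fun he => h.1 he.symm)
    simp [pyDelKey, this, ih h.2]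

theorem A_inner (todo : List (String × String)) :
    ∀ (last : PySem.Dict String String) (pre : List (String × String)),
    (todo.map Prod.fst).Nodup →
    (∀ q ∈ todo.map Prod.fst, q ∉ pre.map Prod.fst) →
    (todo.foldl aInner (last, pre ++ todo)).2
        = pre ++ todo.filter (fun pv => !(decide (PySem.Dict.get? last pv.1 = some pv.2)))
    ∧ ∀ p, PySem.Dict.get? (todo.foldl aInner (last, pre ++ todo)).1 p
        = (match todo.find? (fun pv => pv.1 == p) with
           | some pv => some pv.2
           | none => PySem.Dict.get? last p) := by
  induction todo with
  | nil => exact fun last pre _ _ => ⟨rfl, fun p => rfl⟩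
  | cons pv todo ih =>
    intro last pre hnd hdisj
    simp only [List.map_cons, List.nodup_cons] at hnd
    have hpv1pre : pv.1 ∉ pre.map Prod.fst := hdisj pv.1 (by simp)
    have hstep : aInner (last, pre ++ pv :: todo) pv =
        (if PySem.Dict.get? last pv.1 = some pv.2 then (last, pyDelKey (pre ++ pv :: todo) pv.1)
         else (PySem.Dict.insert last pv.1 pv.2, pre ++ pv :: todo)) := by
      simp [aInner, aCond_eq]
    rw [List.foldl_cons, hstep]
    by_cases hc : PySem.Dict.get? last pv.1 = some pv.2
    · rw [if_pos hc, pyDelKey_append hpv1pre]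
      have hdisj' : ∀ q ∈ todo.map Prod.fst, q ∉ pre.map Prod.fst :=
        fun q hq => hdisj q (by simp [hq])
      obtain ⟨ih1, ih2⟩ := ih last pre hnd.2 hdisj'
      refine ⟨?_, ?_⟩
      · rw [ih1, List.filter_cons]
        simp [hc]
      · intro p
        rw [ih2 p]
        by_cases hp : pv.1 = p
        · subst hp
          have hfind : todo.find? (fun x => x.1 == pv.1) = none :=
            List.find?_eq_none.mpr (fun x hx hbe =>
              hnd.1 (by rw [← eq_of_beq hbe]; exact List.mem_map_of_mem hx))
          simp [hfind, hc]
        · have hbe : (pv.1 == p) = false := beq_eq_false_iff_ne.mpr hp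
          simp [hbe]
    · rw [if_neg hc]
      have hassoc : pre ++ pv :: todo = (pre ++ [pv]) ++ todo := by simp
      rw [hassoc]
      have hdisj' : ∀ q ∈ todo.map Prod.fst, q ∉ (pre ++ [pv]).map Prod.fst := by
        intro q hq hmem
        rcases (by simpa using hmem : q ∈ pre.map Prod.fst ∨ q = pv.1) with h | h
        · exact hdisj q (by simp [hq]) h
        · exact hnd.1 (h ▸ hq)
      obtain ⟨ih1, ih2⟩ := ih (PySem.Dict.insert last pv.1 pv.2) (pre ++ [pv]) hnd.2 hdisj'
      refine ⟨?_, ?_⟩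
      · rw [ih1]
        have hfe : todo.filter
              (fun x => !(decide (PySem.Dict.get? (PySem.Dict.insert last pv.1 pv.2) x.1 = some x.2)))
            = todo.filter (fun x => !(decide (PySem.Dict.get? last x.1 = some x.2))) := by
          apply List.filter_congr
          intro x hx
          have hne : x.1 ≠ pv.1 := fun h => hnd.1 (h ▸ List.mem_map_of_mem hx)
          rw [PySem.Dict.get?_insert_of_ne _ _ hne]
        rw [hfe, List.filter_cons]
        simp [hc]
      · intro p
        rw [ih2 p]
        by_cases hp : pv.1 = p
        · subst hp
          have hfind : todo.find? (fun x => x.1 == pv.1) = none :=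
            List.find?_eq_none.mpr (fun x hx hbe =>
              hnd.1 (by rw [← eq_of_beq hbe]; exact List.mem_map_of_mem hx))
          simp [hfind, PySem.Dict.get?_insert_self]
        · have hbe : (pv.1 == p) = false := beq_eq_false_iff_ne.mpr hp
          have hne : p ≠ pv.1 := fun h => hp h.symm
          simp [hbe, PySem.Dict.get?_insert_of_ne _ _ hne]

theorem A_outer (rest : List (String × List (String × String))) :
    ∀ (last : PySem.Dict String String) (out : List (String × List (String × String)))
      (f : String → Option String),
    (∀ p, PySem.Dict.get? last p = f p) →
    (rest.map Prod.fst).Nodup →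
    (∀ sp ∈ rest, (sp.2.map Prod.fst).Nodup) →
    (rest.foldl aOuter (last, out)).2
      = out ++ rest.map (fun sp =>
          (sp.1, sp.2.filter (fun pv => decide (sp.1 ∈ mask (f pv.1) (occs pv.1 rest))))) := by
  induction rest with
  | nil => intro last out f _ _ _; simp
  | cons sp rest ih =>
    intro last out f hf hnd hitems
    obtain ⟨hnd1, hnd2⟩ : sp.1 ∉ rest.map Prod.fst ∧ (rest.map Prod.fst).Nodup := by
      simpa using hnd
    have hsp2 : (sp.2.map Prod.fst).Nodup := hitems sp (by simp)
    obtain ⟨hA1, hA2⟩ := A_inner sp.2 last [] hsp2 (by simp)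
    simp only [List.nil_append] at hA1 hA2
    have houter : aOuter (last, out) sp
        = ((sp.2.foldl aInner (last, sp.2)).1,
           out ++ [(sp.1, sp.2.filter (fun pv => !(decide (f pv.1 = some pv.2))))]) := by
      simp only [aOuter, hA1, hf]
    rw [List.foldl_cons, houter]
    have hf' : ∀ p, PySem.Dict.get? (sp.2.foldl aInner (last, sp.2)).1 p
        = (match sp.2.find? (fun pv => pv.1 == p) with
           | some pv => some pv.2
           | none => f p) := by
      intro p
      rw [hA2 p, hf p]
    rw [ih _ _ _ hf' hnd2 (fun s hs => hitems s (by simp [hs]))]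
    have hhead : sp.2.filter (fun pv => !(decide (f pv.1 = some pv.2)))
        = sp.2.filter (fun pv => decide (sp.1 ∈ mask (f pv.1) (occs pv.1 (sp :: rest)))) := by
      apply List.filter_congr
      intro pv hpv
      have hocc : occs pv.1 (sp :: rest) = (sp.1, pv.2) :: occs pv.1 rest := by
        rw [occs_cons, filter_key_singleton hsp2 hpv]
        simp
      rw [hocc, mask_cons]
      by_cases hfv : f pv.1 = some pv.2
      · rw [if_pos hfv]
        have hno : sp.1 ∉ mask (some pv.2) (occs pv.1 rest) :=
          fun hmem => hnd1 (mem_occs_steps (mem_mask_sub hmem))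
        simp [hfv, hno]
      · rw [if_neg hfv]
        simp [hfv]
    have htail : rest.map (fun sp' => (sp'.1, sp'.2.filter (fun pv =>
            decide (sp'.1 ∈ mask ((match sp.2.find? (fun x => x.1 == pv.1) with
                                    | some pw => some pw.2
                                    | none => f pv.1)) (occs pv.1 rest)))))
        = rest.map (fun sp' => (sp'.1, sp'.2.filter (fun pv =>
            decide (sp'.1 ∈ mask (f pv.1) (occs pv.1 (sp :: rest)))))) := by
      apply List.map_congr_left
      intro sp' hsp'
      have hsp'1 : sp'.1 ≠ sp.1 := fun h => hnd1 (h ▸ List.mem_map_of_mem hsp')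
      congr 1
      apply List.filter_congr
      intro pv hpv
      rw [occs_cons, mask_append]
      have hnot : sp'.1 ∉ mask (f pv.1)
          ((sp.2.filter (fun x => x.1 == pv.1)).map (fun x => (sp.1, x.2))) := by
        intro hm
        have hm2 := mem_mask_sub hm
        simp only [List.map_map, List.mem_map] at hm2
        obtain ⟨x, _, hx⟩ := hm2
        exact hsp'1 (by simpa using hx.symm)
      have hlast : lastV (f pv.1) ((sp.2.filter (fun x => x.1 == pv.1)).map (fun x => (sp.1, x.2)))
          = (match sp.2.find? (fun x => x.1 == pv.1) with
             | some pw => some pw.2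
             | none => f pv.1) := by
        cases hfind : sp.2.find? (fun x => x.1 == pv.1) with
        | none =>
          have hnilf : sp.2.filter (fun x => x.1 == pv.1) = [] :=
            List.filter_eq_nil_iff.mpr (fun x hx hb => (List.find?_eq_none.mp hfind x hx) hb)
          simp [hnilf, lastV]
        | some pw =>
          have hpwm : pw ∈ sp.2 := List.mem_of_find?_eq_some hfind
          have hb : (pw.1 == pv.1) = true := List.find?_some (p := fun x : String × String => x.1 == pv.1) hfind
          have hpw1 : pw.1 = pv.1 := eq_of_beq hb
          have hone : sp.2.filter (fun x => x.1 == pv.1) = [pw] := by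
            have h0 := filter_key_singleton hsp2 hpwm
            simpa only [hpw1] using h0
          simp [hone, lastV]
      rw [hlast]
      simp [List.mem_append, hnot]
    rw [hhead, htail]
    simp

theorem A_eq_spec (data : List (String × List (String × String)))
    (hpre : Pre_drop_duplication data) : drop_duplication data = specOut data := by
  unfold drop_duplication specOut
  rw [A_outer data PySem.Dict.empty [] (fun _ => none)
      (fun p => PySem.Dict.get?_empty p) hpre.1 hpre.2]
  simp

theorem occ_getD (data : List (String × List (String × String))) :
    ∀ (occ : PySem.Dict String (List (String × String))) (p : String),
    PySem.Dict.getD (data.foldl bOcc occ) p [] = PySem.Dict.getD occ p [] ++ occs p data := by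
  induction data with
  | nil => intro occ p; simp [occs]
  | cons sp data ih =>
    intro occ p
    rw [List.foldl_cons, ih, occs_cons]
    have h1 : ∀ (l : List (String × String)) (occ : PySem.Dict String (List (String × String))),
        PySem.Dict.getD
            (l.foldl (fun occ pv => PySem.Dict.modify occ pv.1 [] (fun t => t ++ [(sp.1, pv.2)])) occ)
            p []
          = PySem.Dict.getD occ p [] ++ (l.filter (fun pv => pv.1 == p)).map (fun pv => (sp.1, pv.2)) := by
      intro l
      induction l with
      | nil => intro occ; simp
      | cons pv l ihl =>
        intro occ
        rw [List.foldl_cons, ihl]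
        by_cases hp : pv.1 = p
        · subst hp
          rw [PySem.Dict.getD_modify_self]
          simp
        · have hbe : (pv.1 == p) = false := beq_eq_false_iff_ne.mpr hp
          have hne : p ≠ pv.1 := fun h => hp h.symm
          rw [PySem.Dict.getD_modify_of_ne _ _ _ hne]
          simp [hbe]
    show PySem.Dict.getD (bOcc occ sp) p [] ++ occs p data = _
    rw [bOcc, h1 sp.2 occ, List.append_assoc]

theorem occ_nodup_keys (data : List (String × List (String × String)))
    (occ : PySem.Dict String (List (String × String))) (h : occ.keys.Nodup) :
    (data.foldl bOcc occ).keys.Nodup := by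
  induction data generalizing occ with
  | nil => simpa using h
  | cons sp data ih =>
    rw [List.foldl_cons]
    exact ih _ (PySem.Dict.nodup_keys_foldl_modify_key _ _ _ _ _ h)

theorem B_inner (svs : List (String × String)) (q : String) :
    ∀ (prev : Option String) (kp : PySem.Set (String × String)),
    (svs.foldl
      (fun (st : Option String × PySem.Set (String × String)) sv =>
        if st.1 ≠ some sv.2 then (some sv.2, PySem.Set.add st.2 (sv.1, q)) else st)
      (prev, kp)).2
    = PySem.Set.update kp ((mask prev svs).map (fun s => (s, q))) := by
  induction svs with
  | nil => intro prev kp; simp [mask, PySem.Set.update_nil]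
  | cons sv svs ih =>
    intro prev kp
    rw [List.foldl_cons, mask_cons]
    by_cases h : prev = some sv.2
    · rw [if_neg (not_not_intro h), if_pos h, ih]
    · rw [if_pos h, if_neg h, ih, List.map_cons, PySem.Set.update_cons]

theorem keep_mem (items : List (String × List (String × String))) :
    ∀ (kp : PySem.Set (String × String)) (x : String × String),
    x ∈ items.foldl bKeep kp ↔ x ∈ kp ∨ ∃ e ∈ items, x.2 = e.1 ∧ x.1 ∈ mask none e.2 := by
  induction items with
  | nil => intro kp x; simp
  | cons e items ih =>
    intro kp x
    rw [List.foldl_cons, ih]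
    have hb : bKeep kp e = PySem.Set.update kp ((mask none e.2).map (fun s => (s, e.1))) :=
      B_inner e.2 e.1 none kp
    rw [hb, PySem.Set.mem_update]
    have hmm : x ∈ (mask none e.2).map (fun s => (s, e.1)) ↔ x.2 = e.1 ∧ x.1 ∈ mask none e.2 := by
      simp only [List.mem_map, Prod.ext_iff]
      constructor
      · rintro ⟨s, hs, h1, h2⟩
        exact ⟨h2.symm, h1 ▸ hs⟩
      · rintro ⟨h1, h2⟩
        exact ⟨x.1, h2, rfl, h1.symm⟩
    rw [hmm]
    simp only [List.mem_cons]
    constructor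
    · rintro ((h | h) | ⟨e', he', h2, h3⟩)
      · exact Or.inl h
      · exact Or.inr ⟨e, Or.inl rfl, h⟩
      · exact Or.inr ⟨e', Or.inr he', h2, h3⟩
    · rintro (h | ⟨e', (rfl | he'), h2, h3⟩)
      · exact Or.inl (Or.inl h)
      · exact Or.inl (Or.inr ⟨h2, h3⟩)
      · exact Or.inr ⟨e', he', h2, h3⟩

theorem B_eq_spec (data : List (String × List (String × String)))
    (_hpre : Pre_drop_duplication data) : drop_duplication_alt data = specOut data := by
  simp only [drop_duplication_alt, specOut]
  apply List.map_congr_left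
  intro sp hsp
  congr 1
  apply List.filter_congr
  intro pv hpv
  have hk : (data.foldl bOcc PySem.Dict.empty).keys.Nodup :=
    occ_nodup_keys data PySem.Dict.empty (by simp)
  have hgetD : PySem.Dict.getD (data.foldl bOcc PySem.Dict.empty) pv.1 [] = occs pv.1 data := by
    rw [occ_getD data PySem.Dict.empty pv.1]
    simp
  have hiff : (sp.1, pv.1) ∈ (data.foldl bOcc PySem.Dict.empty).items.foldl bKeep PySem.Set.empty
      ↔ sp.1 ∈ mask none (occs pv.1 data) := by
    rw [keep_mem]
    constructor
    · rintro (h | ⟨e, he, h2, h3⟩)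
      · simp [PySem.Set.empty] at h
      · have h4 : PySem.Dict.getD (data.foldl bOcc PySem.Dict.empty) e.1 [] = e.2 :=
          PySem.Dict.getD_of_mem_items _ he hk []
        rw [← h2, hgetD] at h4
        rwa [h4]
    · intro hmem
      have hoccne : (sp.1, pv.2) ∈ occs pv.1 data := by
        simp only [occs, List.mem_flatMap]
        exact ⟨sp, hsp, List.mem_map_of_mem (List.mem_filter.mpr ⟨hpv, by simp⟩)⟩
      cases hq : PySem.Dict.get? (data.foldl bOcc PySem.Dict.empty) pv.1 with
      | none =>
        have h0 : PySem.Dict.getD (data.foldl bOcc PySem.Dict.empty) pv.1 [] = [] :=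
          PySem.Dict.getD_of_get?_eq_none _ [] hq
        rw [hgetD.symm.trans h0] at hoccne
        cases hoccne
      | some w =>
        have hw : (pv.1, w) ∈ (data.foldl bOcc PySem.Dict.empty).items :=
          PySem.Dict.mem_items_of_get?_eq_some _ hq
        have hgw : PySem.Dict.getD (data.foldl bOcc PySem.Dict.empty) pv.1 [] = w :=
          PySem.Dict.getD_of_get?_eq_some _ [] hq
        refine Or.inr ⟨(pv.1, w), hw, rfl, ?_⟩
        rwa [hgw.symm.trans hgetD]
  by_cases hm : sp.1 ∈ mask none (occs pv.1 data)
  · rw [(PySem.Set.contains_iff _ _).mpr (hiff.mpr hm), decide_eq_true hm]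
  · have h1 : PySem.Set.contains
        ((data.foldl bOcc PySem.Dict.empty).items.foldl bKeep PySem.Set.empty) (sp.1, pv.1) = false :=
      Bool.eq_false_iff.mpr (fun hq2 => hm (hiff.mp ((PySem.Set.contains_iff _ _).mp hq2)))
    rw [h1, decide_eq_false hm]

-- ===== VERDICT (by name: the statement is the Claim_ definition above) =====
theorem drop_duplication_spec : Claim_equal_drop_duplication := by
  intro data _ hpre
  unfold Spec_drop_duplication
  rw [A_eq_spec data hpre, B_eq_spec data hpre]
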